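-- pv_equiv track=rewrite | github.com/gholmes829/Secret-Language | __main__.py | sub_pass
-- ===== SOURCE A (Python) =====
-- def sub_pass(raw_src):
--     # probably isn't super necessary
--     src = ''
--     for line in raw_src.split('\n'):
--         try:
--             filtered = line[:line.index('#')]
--         except:
--             filtered = line
--         src += filtered.replace(';', '\n')
--     return src
-- ===== SOURCE B (Python) =====
-- def sub_pass(raw_src):
--     # single character-level pass with an in-comment flag (alternative decomposition)
--     out = []
--     in_comment = False
--     for c in raw_src:
--         if in_comment:
--             if c == '\n':
--                 in_comment = False
--         elif c == '#':
--             in_comment = True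
--         elif c == ';':
--             out.append('\n')
--         elif c != '\n':
--             out.append(c)
--     return ''.join(out)
-- ===== Notes on version B (the rewrite author's own statement) =====
-- stated objective: simpler
-- what changed: Replaces the split-on-newline loop with index/slice/replace and string concatenation by a single character-level scan carrying an in-comment flag, emitting characters into a list joined once.
import Mathlib
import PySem

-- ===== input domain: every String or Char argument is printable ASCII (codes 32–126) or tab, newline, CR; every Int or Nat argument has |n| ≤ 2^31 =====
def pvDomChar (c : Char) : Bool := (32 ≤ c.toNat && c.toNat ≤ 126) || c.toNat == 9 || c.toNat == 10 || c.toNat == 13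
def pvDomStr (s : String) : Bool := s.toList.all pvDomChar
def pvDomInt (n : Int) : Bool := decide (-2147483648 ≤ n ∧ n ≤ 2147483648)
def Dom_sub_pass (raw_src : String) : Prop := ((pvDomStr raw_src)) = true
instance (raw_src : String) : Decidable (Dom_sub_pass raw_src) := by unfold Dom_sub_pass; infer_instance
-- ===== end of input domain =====

-- B replaces A's split/index/slice/replace line loop by one character-level scan with an in-comment flag (simpler, one pass).
-- ===== PORT A =====
def sub_pass (raw_src : String) : String :=
  ((PySem.Str.split? raw_src "\n").getD []).foldl
    (fun src line =>
      let i := PySem.Str.find line "#"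
      let filtered := if i = -1 then line else PySem.Str.slice line none (some i)
      src ++ PySem.Str.replace filtered ";" "\n")
    ""

-- ===== PORT B =====
def bScan : List Char → Bool → List Char
  | [], _ => []
  | c :: rest, true => if c = '\n' then bScan rest false else bScan rest true
  | c :: rest, false =>
    if c = '#' then bScan rest true
    else if c = ';' then '\n' :: bScan rest false
    else if c = '\n' then bScan rest false
    else c :: bScan rest false

def sub_pass_alt (raw_src : String) : String := String.ofList (bScan raw_src.toList false)

-- ===== PRECONDITION & SPEC =====
def Spec_sub_pass (raw_src : String) (out : String) : Prop := out = sub_pass_alt raw_src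
instance (raw_src : String) (out : String) : Decidable (Spec_sub_pass raw_src out) := by unfold Spec_sub_pass; infer_instance

-- ===== CLAIM (what is proved, stated in full; the proofs are below) =====
def Claim_equal_sub_pass : Prop := ∀ (raw_src : String), Dom_sub_pass raw_src → Spec_sub_pass raw_src (sub_pass raw_src)

-- ===== LEMMAS AND PROOFS =====

/-- simple structural split on newline -/
def splitNL : List Char → List (List Char)
  | [] => [[]]
  | c :: rest => if c = '\n' then [] :: splitNL rest else (splitNL rest).modifyHead (c :: ·)

/-- per-line result of A: take up to '#', map ';' to '\n' -/
def procA (l : List Char) : List Char :=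
  (l.takeWhile (· ≠ '#')).map (fun c => if c = ';' then '\n' else c)

lemma isPrefixOf_single (a c : Char) (rest : List Char) :
    List.isPrefixOf [a] (c :: rest) = (a == c) := by
  show (a == c && List.isPrefixOf [] rest) = (a == c)
  rw [show List.isPrefixOf ([] : List Char) rest = true from rfl, Bool.and_true]

lemma splitNL_ne_nil (l : List Char) : splitNL l ≠ [] := by
  induction l with
  | nil => simp [splitNL]
  | cons c rest ih =>
    simp only [splitNL]
    split
    · simp
    · cases h : splitNL rest with
      | nil => exact absurd h ih
      | cons x xs => simp [List.modifyHead]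

def consHead (p : List Char) : List (List Char) → List (List Char)
  | [] => [p]
  | x :: xs => (p ++ x) :: xs

lemma splitOn_go_eq (l : List Char) : ∀ (fuel : Nat) (cur : List Char) (acc : List (List Char)),
    l.length ≤ fuel →
    PySem.Chars.splitOn.go ['\n'] fuel l cur acc = acc.reverse ++ consHead cur.reverse (splitNL l) := by
  induction l with
  | nil =>
    intro fuel cur acc _
    cases fuel <;> simp [PySem.Chars.splitOn.go, splitNL, consHead]
  | cons c rest ih =>
    intro fuel cur acc hf
    cases fuel with
    | zero => simp at hf
    | succ f =>
      simp only [PySem.Chars.splitOn.go]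
      by_cases hc : c = '\n'
      · subst hc
        rw [if_pos (by rw [isPrefixOf_single]; simp)]
        rw [show List.drop (['\n'].length) ('\n' :: rest) = rest by simp]
        rw [ih f [] (cur.reverse :: acc) (by simpa using Nat.le_of_succ_le_succ hf)]
        cases h : splitNL rest with
        | nil => exact absurd h (splitNL_ne_nil rest)
        | cons x xs => simp [splitNL, consHead, h]
      · rw [if_neg (by rw [isPrefixOf_single]; exact fun hb => hc (beq_iff_eq.mp hb).symm)]
        rw [ih f (c :: cur) acc (by simpa using Nat.le_of_succ_le_succ hf)]
        cases h : splitNL rest with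
        | nil => exact absurd h (splitNL_ne_nil rest)
        | cons x xs => simp [splitNL, consHead, h, hc, List.modifyHead]

lemma splitOn_eq (l : List Char) : PySem.Chars.splitOn l ['\n'] = splitNL l := by
  rw [PySem.Chars.splitOn, splitOn_go_eq l (l.length + 1) [] [] (by omega)]
  cases h : splitNL l with
  | nil => exact absurd h (splitNL_ne_nil l)
  | cons x xs => simp [consHead]

lemma find_go_ge (l : List Char) : ∀ (k : Nat),
    PySem.Chars.find.go ['#'] l k = -1 ∨ (k : Int) ≤ PySem.Chars.find.go ['#'] l k := by
  induction l with
  | nil => intro k; simp [PySem.Chars.find.go, List.isEmpty]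
  | cons c rest ih =>
    intro k
    simp only [PySem.Chars.find.go]
    split
    · right; exact le_refl _
    · rcases ih (k + 1) with h | h
      · left; exact h
      · right; omega

lemma find_take_eq (l : List Char) : ∀ (k : Nat),
    (if PySem.Chars.find.go ['#'] l k = -1 then l
     else l.take ((PySem.Chars.find.go ['#'] l k).toNat - k)) = l.takeWhile (· ≠ '#') := by
  induction l with
  | nil => intro k; simp [PySem.Chars.find.go, List.isEmpty]
  | cons c rest ih =>
    intro k
    by_cases hc : c = '#'
    · subst hc
      have hp : List.isPrefixOf ['#'] ('#' :: rest) = true := by rw [isPrefixOf_single]; simp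
      simp only [PySem.Chars.find.go, hp, if_true]
      rw [if_neg (by omega)]
      simp [List.takeWhile]
    · have hp : List.isPrefixOf ['#'] (c :: rest) = false := by
        rw [isPrefixOf_single]; exact beq_eq_false_iff_ne.mpr (Ne.symm hc)
      simp only [PySem.Chars.find.go, hp, Bool.false_eq_true, if_false]
      have IH := ih (k + 1)
      by_cases h1 : PySem.Chars.find.go ['#'] rest (k + 1) = -1
      · rw [if_pos h1] at IH ⊢
        rw [List.takeWhile_cons_of_pos (by simp [hc]), ← IH]
      · rw [if_neg h1] at IH ⊢
        rcases find_go_ge rest (k + 1) with h | h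
        · exact absurd h h1
        have heq : (PySem.Chars.find.go ['#'] rest (k + 1)).toNat - k
            = ((PySem.Chars.find.go ['#'] rest (k + 1)).toNat - (k + 1)) + 1 := by omega
        rw [heq, List.take_succ_cons, List.takeWhile_cons_of_pos (by simp [hc]), IH]

lemma replace_go_eq (l : List Char) : ∀ (fuel : Nat) (acc : List Char),
    l.length ≤ fuel →
    PySem.Chars.replace.go [';'] ['\n'] fuel l acc
      = acc.reverse ++ l.map (fun c => if c = ';' then '\n' else c) := by
  induction l with
  | nil => intro fuel acc _; cases fuel <;> simp [PySem.Chars.replace.go]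
  | cons c rest ih =>
    intro fuel acc hf
    cases fuel with
    | zero => simp at hf
    | succ f =>
      simp only [PySem.Chars.replace.go]
      by_cases hc : c = ';'
      · subst hc
        rw [if_pos (by rw [isPrefixOf_single]; simp)]
        rw [show List.drop ([';'].length) (';' :: rest) = rest by simp]
        rw [ih f (['\n'].reverse ++ acc) (by simpa using Nat.le_of_succ_le_succ hf)]
        simp
      · rw [if_neg (by rw [isPrefixOf_single]; exact fun hb => hc (beq_iff_eq.mp hb).symm)]
        rw [ih f (c :: acc) (by simpa using Nat.le_of_succ_le_succ hf)]
        simp [hc]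

lemma replace_eq (l : List Char) :
    PySem.Chars.replace l [';'] ['\n'] = l.map (fun c => if c = ';' then '\n' else c) := by
  rw [PySem.Chars.replace, if_neg (by simp [List.isEmpty]), replace_go_eq l l.length [] (le_refl _)]
  simp

lemma lineA_eq (s : String) :
    (PySem.Str.replace
      (if PySem.Str.find s "#" = -1 then s
       else PySem.Str.slice s none (some (PySem.Str.find s "#"))) ";" "\n").toList
      = procA s.toList := by
  rw [PySem.Str.toList_replace]
  have hs : ((if PySem.Str.find s "#" = -1 then s
      else PySem.Str.slice s none (some (PySem.Str.find s "#"))) : String).toList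
      = s.toList.takeWhile (· ≠ '#') := by
    by_cases h : PySem.Str.find s "#" = -1
    · rw [if_pos h]
      have := find_take_eq s.toList 0
      rw [if_pos (by simpa [PySem.Str.find, PySem.Chars.find] using h)] at this
      exact this
    · rw [if_neg h, PySem.Str.toList_slice]
      have hge : (0 : Int) ≤ PySem.Str.find s "#" := by
        rcases find_go_ge s.toList 0 with h0 | h0
        · exact absurd (by simpa [PySem.Str.find, PySem.Chars.find] using h0) h
        · simpa [PySem.Str.find, PySem.Chars.find] using h0
      rw [PySem.Chars.slice_eq_listSlice, PySem.List.slice_to _ hge]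
      have := find_take_eq s.toList 0
      rw [if_neg (by simpa [PySem.Str.find, PySem.Chars.find] using h)] at this
      simpa [PySem.Str.find, PySem.Chars.find] using this
  rw [hs]
  have h1 : (";" : String).toList = [';'] := rfl
  have h2 : ("\n" : String).toList = ['\n'] := rfl
  rw [h1, h2, replace_eq]
  rfl

lemma foldA_eq (lines : List String) : ∀ (acc : String),
    (lines.foldl
      (fun src line =>
        let i := PySem.Str.find line "#"
        let filtered := if i = -1 then line else PySem.Str.slice line none (some i)
        src ++ PySem.Str.replace filtered ";" "\n") acc).toList
      = acc.toList ++ (lines.map String.toList).flatMap procA := by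
  induction lines with
  | nil => intro acc; simp
  | cons line rest ih =>
    intro acc
    simp only [List.foldl_cons, List.map_cons, List.flatMap_cons]
    rw [ih]
    simp only [String.toList_append]
    rw [lineA_eq line, List.append_assoc]

lemma bScan_eq (cs : List Char) :
    bScan cs false = (splitNL cs).flatMap procA ∧
    bScan cs true = ((splitNL cs).tail).flatMap procA := by
  induction cs with
  | nil => simp [bScan, splitNL, procA]
  | cons c rest ih =>
    obtain ⟨ihF, ihT⟩ := ih
    constructor
    · by_cases hn : c = '\n'
      · subst hn; simp [bScan, splitNL, ihF, procA]
      · by_cases hh : c = '#'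
        · subst hh
          cases h : splitNL rest with
          | nil => exact absurd h (splitNL_ne_nil rest)
          | cons x xs =>
            rw [show bScan ('#' :: rest) false = bScan rest true by simp [bScan], ihT]
            simp [splitNL, h, List.modifyHead, procA, List.takeWhile]
        · cases h : splitNL rest with
          | nil => exact absurd h (splitNL_ne_nil rest)
          | cons x xs =>
            by_cases hs : c = ';'
            · subst hs
              rw [show bScan (';' :: rest) false = '\n' :: bScan rest false by simp [bScan], ihF]
              simp [splitNL, h, List.modifyHead, procA, List.takeWhile]
            · rw [show bScan (c :: rest) false = c :: bScan rest false by
                simp [bScan, hn, hh, hs], ihF]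
              simp [splitNL, h, hn, List.modifyHead, procA, List.takeWhile, hh, hs]
    · by_cases hn : c = '\n'
      · subst hn; simp [bScan, splitNL, ihF]
      · rw [show bScan (c :: rest) true = bScan rest true by simp [bScan, hn], ihT]
        simp only [splitNL, if_neg hn]
        cases h : splitNL rest with
        | nil => exact absurd h (splitNL_ne_nil rest)
        | cons x xs => simp [List.modifyHead]

lemma split?_getD (raw_src : String) :
    ((PySem.Str.split? raw_src "\n").getD []).map String.toList = splitNL raw_src.toList := by
  have hsep : ("\n" : String).toList = ['\n'] := rfl
  simp only [PySem.Str.split?, PySem.Chars.split?, hsep]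
  rw [if_neg (by simp [List.isEmpty])]
  simp only [Option.getD_some, Option.map_some, List.map_map, splitOn_eq]
  simp [Function.comp_def]

-- ===== VERDICT (by name: the statement is the Claim_ definition above) =====
theorem sub_pass_spec : Claim_equal_sub_pass := by
  intro raw_src _
  unfold Spec_sub_pass sub_pass sub_pass_alt
  rw [← String.toList_inj]
  rw [foldA_eq, split?_getD, String.toList_ofList, (bScan_eq raw_src.toList).1]
  simp
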